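-- pv_equiv track=rewrite | github.com/paiml/depyler | examples/hard_carry_addition.py | chain_carry_count
-- ===== SOURCE A (Python) =====
-- def chain_carry_count(digits_a: list[int], digits_b: list[int], size: int) -> int:
--     """Count how many consecutive carries occur during addition."""
--     carry: int = 0
--     max_chain: int = 0
--     current_chain: int = 0
--     i: int = 0
--     while i < size:
--         total: int = digits_a[i] + digits_b[i] + carry
--         carry = total // 10
--         if carry > 0:
--             current_chain = current_chain + 1
--             if current_chain > max_chain:
--                 max_chain = current_chain
--         else:
--             current_chain = 0
--         i = i + 1
--     return max_chain
-- ===== SOURCE B (Python) =====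
-- def chain_carry_count(digits_a: list[int], digits_b: list[int], size: int) -> int:
--     """Two-phase: build the list of carry flags, then find the longest run of True."""
--     carries = []
--     carry = 0
--     for i in range(size):
--         carry = (digits_a[i] + digits_b[i] + carry) // 10
--         carries.append(carry > 0)
--     best = 0
--     i = 0
--     n = len(carries)
--     while i < n:
--         if carries[i]:
--             j = i
--             while j < n and carries[j]:
--                 j += 1
--             if j - i > best:
--                 best = j - i
--             i = j
--         else:
--             i += 1
--     return best
-- ===== Notes on version B (the rewrite author's own statement) =====
-- stated objective: alternative
-- what changed: B separates the computation into two phases: a first pass threads the carry to build an explicit list of carry flags, and a second run-skipping two-pointer pass finds the longest consecutive run of flags, instead of A's single loop interleaving arithmetic with chain/max bookkeeping.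
import Mathlib
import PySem

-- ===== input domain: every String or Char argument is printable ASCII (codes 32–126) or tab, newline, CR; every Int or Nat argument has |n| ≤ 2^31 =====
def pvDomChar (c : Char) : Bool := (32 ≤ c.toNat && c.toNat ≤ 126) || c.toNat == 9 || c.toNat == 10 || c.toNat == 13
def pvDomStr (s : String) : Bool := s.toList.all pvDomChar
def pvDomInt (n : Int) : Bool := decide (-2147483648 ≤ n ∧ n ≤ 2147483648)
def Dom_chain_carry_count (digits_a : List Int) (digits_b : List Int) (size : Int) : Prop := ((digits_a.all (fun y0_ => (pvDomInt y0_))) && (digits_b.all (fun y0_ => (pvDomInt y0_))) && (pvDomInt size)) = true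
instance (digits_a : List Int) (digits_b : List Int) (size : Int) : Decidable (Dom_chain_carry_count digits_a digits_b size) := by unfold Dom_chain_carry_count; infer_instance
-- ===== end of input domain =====

-- B replaces A's single interleaved loop by two phases (build carry-flag list, then a
-- run-skipping longest-run scan); equivalence of RETURN values is proved on Pre_ below.

-- ===== PORT A =====
-- while i < size ported as structural recursion over the index list pyRange 0 size 1;
-- digits[i] ported with pyGet? (in range whenever Pre_ holds; .getD 0 only pads the excluded raising inputs).
def aLoop (a b : List Int) : List Int → Int → Int → Int → Int
  | [], _, _, mx => mx
  | i :: is, carry, cur, mx =>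
    let total : Int := (PySem.List.pyGet? a i).getD 0 + (PySem.List.pyGet? b i).getD 0 + carry
    let carry' := PySem.Int.floordiv total 10
    if carry' > 0 then
      aLoop a b is carry' (cur + 1) (if cur + 1 > mx then cur + 1 else mx)
    else
      aLoop a b is carry' 0 mx

def chain_carry_count (digits_a : List Int) (digits_b : List Int) (size : Int) : Int :=
  aLoop digits_a digits_b (PySem.List.pyRange 0 size 1) 0 0 0

-- ===== PORT B =====
-- phase 1 of Source B: thread the carry over range(size), collecting the flags carry > 0
def carriesLoop (a b : List Int) : List Int → Int → List Bool
  | [], _ => []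
  | i :: is, carry =>
    let carry' := PySem.Int.floordiv ((PySem.List.pyGet? a i).getD 0 + (PySem.List.pyGet? b i).getD 0 + carry) 10
    decide (carry' > 0) :: carriesLoop a b is carry'

-- phase 2 of Source B: the index-based run-skipping while loop, ported on the suffix of the
-- flag list; the inner `while j < n and carries[j]` scan is the takeWhile prefix.
def lrLoop : List Bool → Int → Int
  | [], best => best
  | false :: rest, best => lrLoop rest best
  | true :: rest, best =>
      let t := (rest.takeWhile (· == true)).length
      let k : Int := 1 + (t : Int)
      lrLoop (rest.drop t) (if k > best then k else best)
  termination_by fs _ => fs.length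
  decreasing_by
  all_goals simp [List.length_drop]

def chain_carry_count_alt (digits_a : List Int) (digits_b : List Int) (size : Int) : Int :=
  lrLoop (carriesLoop digits_a digits_b (PySem.List.pyRange 0 size 1) 0) 0

-- ===== PRECONDITION & SPEC =====
-- Pre_ excludes exactly the inputs where Python A raises IndexError (size exceeds a list length);
-- B raises there too.
def Pre_chain_carry_count (digits_a : List Int) (digits_b : List Int) (size : Int) : Prop :=
  size ≤ (digits_a.length : Int) ∧ size ≤ (digits_b.length : Int)
instance (digits_a : List Int) (digits_b : List Int) (size : Int) : Decidable (Pre_chain_carry_count digits_a digits_b size) := by unfold Pre_chain_carry_count; infer_instance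

def pvWitness_chain_carry_count : List Int × List Int × Int := ([9, 9, 1], [1, 0, 8], 3)

def Spec_chain_carry_count (digits_a : List Int) (digits_b : List Int) (size : Int) (out : Int) : Prop := out = chain_carry_count_alt digits_a digits_b size
instance (digits_a : List Int) (digits_b : List Int) (size : Int) (out : Int) : Decidable (Spec_chain_carry_count digits_a digits_b size out) := by unfold Spec_chain_carry_count; infer_instance

-- ===== CLAIM (what is proved, stated in full; the proofs are below) =====
def Claim_equal_chain_carry_count : Prop := ∀ (digits_a : List Int) (digits_b : List Int) (size : Int), Dom_chain_carry_count digits_a digits_b size → Pre_chain_carry_count digits_a digits_b size → Spec_chain_carry_count digits_a digits_b size (chain_carry_count digits_a digits_b size)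

-- ===== LEMMAS AND PROOFS =====

-- the common yardstick: maximal run of `true`s, where the run currently open has length `cur`
def maxExt : List Bool → Int → Int
  | [], cur => cur
  | true :: fs, cur => maxExt fs (cur + 1)
  | false :: fs, cur => if cur > maxExt fs 0 then cur else maxExt fs 0

theorem maxExt_ge (fs : List Bool) : ∀ cur : Int, cur ≤ maxExt fs cur := by
  induction fs with
  | nil => intro cur; simp [maxExt]
  | cons f fs ih =>
    intro cur
    cases f
    · simp only [maxExt]; split_ifs with h <;> [omega; omega]
    · simp only [maxExt]; have := ih (cur + 1); omega

theorem aLoop_eq (a b : List Int) (idxs : List Int) :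
    ∀ carry cur mx : Int, 0 ≤ cur → cur ≤ mx →
      aLoop a b idxs carry cur mx = max mx (maxExt (carriesLoop a b idxs carry) cur) := by
  induction idxs with
  | nil =>
    intro carry cur mx h0 hle
    simp only [aLoop, carriesLoop, maxExt, max_def]
    split_ifs <;> omega
  | cons i is ih =>
    intro carry cur mx h0 hle
    simp only [aLoop, carriesLoop]
    by_cases h : PySem.Int.floordiv ((PySem.List.pyGet? a i).getD 0 + (PySem.List.pyGet? b i).getD 0 + carry) 10 > 0
    · simp only [h, if_pos, decide_true, maxExt]
      rw [ih _ (cur + 1) (if cur + 1 > mx then cur + 1 else mx) (by omega) (by split_ifs <;> omega)]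
      have hge := maxExt_ge (carriesLoop a b is (PySem.Int.floordiv ((PySem.List.pyGet? a i).getD 0 + (PySem.List.pyGet? b i).getD 0 + carry) 10)) (cur + 1)
      simp only [max_def]; split_ifs <;> omega
    · simp only [h, if_neg, not_false_eq_true, decide_false, maxExt]
      rw [ih _ 0 mx le_rfl (by omega)]
      have hge := maxExt_ge (carriesLoop a b is (PySem.Int.floordiv ((PySem.List.pyGet? a i).getD 0 + (PySem.List.pyGet? b i).getD 0 + carry) 10)) 0
      simp only [max_def]; split_ifs <;> omega

theorem maxExt_lead (fs : List Bool) : ∀ cur : Int, 0 ≤ cur →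
    maxExt fs cur = max (cur + ((fs.takeWhile (· == true)).length : Int))
      (maxExt (fs.drop (fs.takeWhile (· == true)).length) 0) := by
  induction fs with
  | nil => intro cur h0; simp [maxExt, max_def]; omega
  | cons f fs ih =>
    intro cur h0
    cases f
    · have ht : (false :: fs).takeWhile (· == true) = [] := by simp
      have hge := maxExt_ge fs (0 : Int)
      rw [ht]
      simp only [List.length_nil, List.drop_zero, Nat.cast_zero, add_zero, maxExt, max_def]
      split_ifs <;> omega
    · have ht : (true :: fs).takeWhile (· == true) = true :: fs.takeWhile (· == true) := by
        simp
      rw [ht]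
      simp only [List.length_cons, List.drop_succ_cons, maxExt]
      rw [ih (cur + 1) (by omega)]
      push_cast
      congr 1
      omega

theorem lrLoop_eq_aux : ∀ (n : Nat) (fs : List Bool), fs.length ≤ n → ∀ best : Int, 0 ≤ best →
    lrLoop fs best = max best (maxExt fs 0) := by
  intro n
  induction n with
  | zero =>
    intro fs hlen best h0
    have : fs = [] := by cases fs <;> simp_all
    subst this
    simp [lrLoop, maxExt, max_def]; omega
  | succ n ih =>
    intro fs hlen best h0
    match fs with
    | [] => simp [lrLoop, maxExt, max_def]; omega
    | false :: rest =>
      have hge := maxExt_ge rest (0 : Int)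
      have hr : rest.length ≤ n := by simp at hlen; omega
      simp only [lrLoop, maxExt, ih rest hr best h0, max_def]
      split_ifs <;> omega
    | true :: rest =>
      simp only [lrLoop]
      have hlen' : (rest.drop (rest.takeWhile (· == true)).length).length ≤ n := by
        simp only [List.length_drop]
        simp at hlen
        omega
      rw [ih _ hlen' _ (by split_ifs <;> omega)]
      have h1 : maxExt (true :: rest) 0 = maxExt rest 1 := by simp [maxExt]
      rw [h1, maxExt_lead rest 1 (by norm_num)]
      have hge := maxExt_ge (rest.drop (rest.takeWhile (· == true)).length) (0 : Int)
      simp only [max_def]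
      split_ifs <;> omega

theorem lrLoop_eq (fs : List Bool) (best : Int) (h0 : 0 ≤ best) :
    lrLoop fs best = max best (maxExt fs 0) :=
  lrLoop_eq_aux fs.length fs le_rfl best h0

-- ===== VERDICT (by name: the statement is the Claim_ definition above) =====
theorem chain_carry_count_spec : Claim_equal_chain_carry_count := by
  intro a b size _ _
  unfold Spec_chain_carry_count chain_carry_count chain_carry_count_alt
  rw [aLoop_eq a b _ 0 0 0 le_rfl le_rfl, lrLoop_eq _ 0 le_rfl]
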